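-- pv_equiv track=rewrite | github.com/Sulax315/operator-local-desktop | scripts/operator_workflows/excel_financial_extractor.py | _best_amount_col
-- ===== SOURCE A (Python) =====
-- _AMOUNT_HEADER_ORDER = (
--     "update current budget",
--     "spent to date",
--     "current budget",
--     "committed to date",
--     "billed to date",
--     "actual cost",
--     "open commitments",
--     "budget less committed",
--     "original budget",
--     "variance",
--     "amount",
--     "value",
--     "total",
-- )
--
-- def _best_amount_col(labels: list[str]) -> int:
--     """Choose a numeric value column, preferring current / spent columns over static budget."""
--     for hint in _AMOUNT_HEADER_ORDER:
--         for j, lab in enumerate(labels):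
--             if lab and hint in lab:
--                 return j
--     for j, lab in enumerate(labels):
--         if not lab:
--             continue
--         if any(
--             k in lab
--             for k in (
--                 "amount",
--                 "cost",
--                 "value",
--                 "budget",
--                 "total",
--                 "profit",
--                 "revenue",
--             )
--         ):
--             return j
--     return -1
-- ===== SOURCE B (Python) =====
-- _AMOUNT_HEADER_ORDER = (
--     "update current budget",
--     "spent to date",
--     "current budget",
--     "committed to date",
--     "billed to date",
--     "actual cost",
--     "open commitments",
--     "budget less committed",
--     "original budget",
--     "variance",
--     "amount",
--     "value",
--     "total",
-- )
--
-- _FALLBACK_KEYWORDS = ("amount", "cost", "value", "budget", "total", "profit", "revenue")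
--
--
-- def _rank(lab):
--     """Priority rank of a label: index of the first hint it contains, else
--     len(_AMOUNT_HEADER_ORDER) if it contains any fallback keyword, else None."""
--     if not lab:
--         return None
--     for i, h in enumerate(_AMOUNT_HEADER_ORDER):
--         if h in lab:
--             return i
--     if any(k in lab for k in _FALLBACK_KEYWORDS):
--         return len(_AMOUNT_HEADER_ORDER)
--     return None
--
--
-- def _best_amount_col(labels: list[str]) -> int:
--     best = None  # (rank, index) with the smallest rank seen, earliest index on ties
--     for j, lab in enumerate(labels):
--         r = _rank(lab)
--         if r is None:
--             continue
--         if best is None or r < best[0]: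
--             best = (r, j)
--     return best[1] if best is not None else -1
-- ===== Notes on version B (the rewrite author's own statement) =====
-- stated objective: alternative
-- what changed: Replaces A's hint-outer nested scans (13 hint passes over the labels plus a fallback pass) by a single label-outer pass that scores each label with a priority rank and keeps the (rank, index) argmin.
import Mathlib
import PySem

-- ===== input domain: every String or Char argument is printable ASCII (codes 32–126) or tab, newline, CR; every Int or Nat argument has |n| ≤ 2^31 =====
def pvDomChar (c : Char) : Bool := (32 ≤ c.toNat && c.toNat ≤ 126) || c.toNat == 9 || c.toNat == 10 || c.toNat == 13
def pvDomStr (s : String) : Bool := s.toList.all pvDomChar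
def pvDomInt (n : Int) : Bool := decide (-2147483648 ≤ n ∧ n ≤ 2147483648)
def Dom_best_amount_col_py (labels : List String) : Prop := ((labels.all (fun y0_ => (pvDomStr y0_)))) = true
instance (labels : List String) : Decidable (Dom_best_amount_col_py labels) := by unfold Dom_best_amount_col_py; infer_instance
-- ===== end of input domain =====

-- B replaces A's hint-outer nested scans by a single label-outer scoring pass keeping the (rank, index) argmin (objective: alternative decomposition).


def pvHints : List String :=
  ["update current budget", "spent to date", "current budget", "committed to date",
   "billed to date", "actual cost", "open commitments", "budget less committed",
   "original budget", "variance", "amount", "value", "total"]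

def pvFallbacks : List String :=
  ["amount", "cost", "value", "budget", "total", "profit", "revenue"]

-- ===== PORT A =====
-- inner loop: 'for j, lab in enumerate(labels): if lab and hint in lab: return j'
def pvFindHint (hint : String) : List (Int × String) → Option Int
  | [] => none
  | (j, lab) :: rest =>
    if lab ≠ "" ∧ PySem.Str.isIn hint lab then some j else pvFindHint hint rest

-- outer loop: 'for hint in _AMOUNT_HEADER_ORDER: …'
def pvLoopHints (ps : List (Int × String)) : List String → Option Int
  | [] => none
  | h :: hs =>
    match pvFindHint h ps with
    | some j => some j
    | none => pvLoopHints ps hs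

-- second loop: fallback keyword scan
def pvFindFallback : List (Int × String) → Option Int
  | [] => none
  | (j, lab) :: rest =>
    if lab = "" then pvFindFallback rest
    else if pvFallbacks.any (fun k => PySem.Str.isIn k lab) then some j
    else pvFindFallback rest

def best_amount_col_py (labels : List String) : Int :=
  match pvLoopHints (PySem.List.enumerate labels) pvHints with
  | some j => j
  | none =>
    match pvFindFallback (PySem.List.enumerate labels) with
    | some j => j
    | none => -1

-- ===== PORT B =====
-- '_rank': index of the first hint contained in lab (counter i), else the fallback tier, else none
def pvRankIdx (lab : String) : List String → Nat → Option Nat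
  | [], _ => none
  | h :: t, i => if PySem.Str.isIn h lab then some i else pvRankIdx lab t (i + 1)

def pvRankGen (hs : List String) (lab : String) : Option Nat :=
  if lab = "" then none
  else
    match pvRankIdx lab hs 0 with
    | some i => some i
    | none => if pvFallbacks.any (fun k => PySem.Str.isIn k lab) then some hs.length else none

-- one step of B's pass: keep the (rank, index) pair with the strictly smaller rank
def pvStep (f : String → Option Nat) (best : Option (Nat × Int)) (p : Int × String) : Option (Nat × Int) :=
  match f p.2 with
  | none => best
  | some r =>
    match best with
    | none => some (r, p.1)
    | some (br, bj) => if r < br then some (r, p.1) else some (br, bj)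

def best_amount_col_py_alt (labels : List String) : Int :=
  match (PySem.List.enumerate labels).foldl (pvStep (pvRankGen pvHints)) none with
  | some (_, j) => j
  | none => -1

-- ===== PRECONDITION & SPEC =====
def Spec_best_amount_col_py (labels : List String) (out : Int) : Prop := out = best_amount_col_py_alt labels
instance (labels : List String) (out : Int) : Decidable (Spec_best_amount_col_py labels out) := by unfold Spec_best_amount_col_py; infer_instance

-- ===== CLAIM (what is proved, stated in full; the proofs are below) =====
def Claim_equal_best_amount_col_py : Prop := ∀ (labels : List String), Dom_best_amount_col_py labels → Spec_best_amount_col_py labels (best_amount_col_py labels)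

-- ===== LEMMAS AND PROOFS =====
-- A's whole body, generic in the hint list
def pvOutA (hs : List String) (ps : List (Int × String)) : Int :=
  match pvLoopHints ps hs with
  | some j => j
  | none =>
    match pvFindFallback ps with
    | some j => j
    | none => -1

-- B's whole body, generic in the rank function
def pvOutB (f : String → Option Nat) (ps : List (Int × String)) : Int :=
  match ps.foldl (pvStep f) none with
  | some (_, j) => j
  | none => -1
theorem pvRankIdx_succ (lab : String) (t : List String) (i : Nat) :
    pvRankIdx lab t (i + 1) = (pvRankIdx lab t i).map (· + 1) := by
  induction t generalizing i with
  | nil => rfl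
  | cons h t ih =>
    simp only [pvRankIdx]
    split <;> simp [ih]

theorem pvRankGen_nil (lab : String) :
    pvRankGen [] lab =
      if lab = "" then none
      else if pvFallbacks.any (fun k => PySem.Str.isIn k lab) then some 0 else none := rfl

theorem pvRankGen_cons (h : String) (t : List String) (lab : String) :
    pvRankGen (h :: t) lab =
      if lab = "" then none
      else if PySem.Str.isIn h lab then some 0
      else (pvRankGen t lab).map (· + 1) := by
  by_cases he : lab = ""
  · simp [pvRankGen, he]
  · rw [if_neg he]
    unfold pvRankGen
    rw [if_neg he, if_neg he]
    simp only [pvRankIdx]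
    cases hi : PySem.Str.isIn h lab with
    | true =>
      rw [if_pos rfl]
      rfl
    | false =>
      simp only [Bool.false_eq_true, if_false]
      rw [pvRankIdx_succ]
      cases hr : pvRankIdx lab t 0 with
      | some i => rfl
      | none =>
        simp only [Option.map_none]
        cases hf : pvFallbacks.any (fun k => PySem.Str.isIn k lab) with
        | true => simp
        | false => simp
theorem pvFold_absorb (f : String → Option Nat) (ps : List (Int × String)) (j : Int) :
    ps.foldl (pvStep f) (some (0, j)) = some (0, j) := by
  induction ps with
  | nil => rfl
  | cons p ps ih =>
    have hstep : pvStep f (some (0, j)) p = some (0, j) := by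
      unfold pvStep
      cases f p.2 with
      | none => rfl
      | some r => simp
    simp only [List.foldl_cons, hstep, ih]

theorem pvFold_shift (f : String → Option Nat) (ps : List (Int × String))
    (best : Option (Nat × Int)) :
    ps.foldl (pvStep (fun lab => (f lab).map (· + 1))) (best.map (fun q => (q.1 + 1, q.2)))
      = (ps.foldl (pvStep f) best).map (fun q => (q.1 + 1, q.2)) := by
  induction ps generalizing best with
  | nil => rfl
  | cons p ps ih =>
    have hstep : pvStep (fun lab => (f lab).map (· + 1)) (best.map (fun q => (q.1 + 1, q.2))) p
        = (pvStep f best p).map (fun q => (q.1 + 1, q.2)) := by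
      simp only [pvStep]
      cases hf2 : f p.2 with
      | none => simp
      | some r =>
        cases best with
        | none => simp
        | some b =>
          obtain ⟨br, bj⟩ := b
          by_cases hlt : r < br
          · simp [hlt]
          · simp [hlt]
    simp only [List.foldl_cons, hstep]
    exact ih (pvStep f best p)

theorem pvFold_base (ps : List (Int × String)) :
    ps.foldl (pvStep (pvRankGen [])) none = (pvFindFallback ps).map (fun j => (0, j)) := by
  induction ps with
  | nil => rfl
  | cons p ps ih =>
    obtain ⟨j, lab⟩ := p
    simp only [List.foldl_cons, pvFindFallback]
    by_cases he : lab = ""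
    · have hstep : pvStep (pvRankGen []) none (j, lab) = none := by
        unfold pvStep
        rw [pvRankGen_nil, if_pos he]
      rw [hstep, ih, if_pos he]
    · cases hf : pvFallbacks.any (fun k => PySem.Str.isIn k lab) with
      | true =>
        have hstep : pvStep (pvRankGen []) none (j, lab) = some (0, j) := by
          unfold pvStep
          rw [pvRankGen_nil, if_neg he, if_pos hf]
        rw [hstep, pvFold_absorb]
        simp [he]
      | false =>
        have hstep : pvStep (pvRankGen []) none (j, lab) = none := by
          unfold pvStep
          rw [pvRankGen_nil, if_neg he, if_neg (by rw [hf]; simp)]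
        rw [hstep, ih]
        simp [he]

theorem pvFindHint_none (h : String) (ps : List (Int × String))
    (hn : pvFindHint h ps = none) :
    ∀ q ∈ ps, ¬ (q.2 ≠ "" ∧ PySem.Str.isIn h q.2 = true) := by
  induction ps with
  | nil => intro q hq; simp at hq
  | cons a as iha =>
    intro q hq
    obtain ⟨aj, alab⟩ := a
    simp only [pvFindHint] at hn
    by_cases ha : alab ≠ "" ∧ PySem.Str.isIn h alab
    · rw [if_pos ha] at hn; cases hn
    · rw [if_neg ha] at hn
      rcases List.mem_cons.mp hq with rfl | hq'
      · exact ha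
      · exact iha hn q hq'
theorem pvFold_firstZero (h : String) (t : List String) (ps : List (Int × String)) (j : Int) :
    ∀ best : Option (Nat × Int), pvFindHint h ps = some j →
      (∀ r bj, best = some (r, bj) → 0 < r) →
      ps.foldl (pvStep (pvRankGen (h :: t))) best = some (0, j) := by
  induction ps with
  | nil => intro best hfind _; simp [pvFindHint] at hfind
  | cons p ps ih =>
    intro best hfind hpos
    obtain ⟨pj, lab⟩ := p
    simp only [pvFindHint] at hfind
    by_cases hm : lab ≠ "" ∧ PySem.Str.isIn h lab
    · rw [if_pos hm] at hfind
      injection hfind with hpj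
      subst hpj
      have hstep : pvStep (pvRankGen (h :: t)) best (pj, lab) = some (0, pj) := by
        unfold pvStep
        rw [pvRankGen_cons, if_neg hm.1, if_pos hm.2]
        cases best with
        | none => rfl
        | some b =>
          obtain ⟨br, bj⟩ := b
          have := hpos br bj rfl
          simp [this]
      simp only [List.foldl_cons, hstep, pvFold_absorb]
    · rw [if_neg hm] at hfind
      simp only [List.foldl_cons]
      apply ih _ hfind
      intro r bj hb
      have hrank : pvRankGen (h :: t) lab = (pvRankGen t lab).map (· + 1) ∨
          pvRankGen (h :: t) lab = none := by
        rw [pvRankGen_cons]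
        by_cases he : lab = ""
        · right; rw [if_pos he]
        · left
          rw [if_neg he, if_neg (fun hc => hm ⟨he, hc⟩)]
      unfold pvStep at hb
      rcases hrank with hr | hr
      · rw [hr] at hb
        cases hv : pvRankGen t lab with
        | none =>
          rw [hv] at hb; simp only [Option.map_none] at hb; exact hpos r bj hb
        | some v =>
          rw [hv] at hb; simp only [Option.map_some] at hb
          cases best with
          | none =>
            simp only [Option.some.injEq, Prod.mk.injEq] at hb
            omega
          | some b =>
            obtain ⟨br, bbj⟩ := b
            have hbr := hpos br bbj rfl
            simp only at hb
            by_cases hlt : v + 1 < br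
            · rw [if_pos hlt] at hb
              simp only [Option.some.injEq, Prod.mk.injEq] at hb
              omega
            · rw [if_neg hlt] at hb
              simp only [Option.some.injEq, Prod.mk.injEq] at hb
              omega
      · rw [hr] at hb; exact hpos r bj hb

theorem pvOutA_eq_outB (hs : List String) (ps : List (Int × String)) :
    pvOutA hs ps = pvOutB (pvRankGen hs) ps := by
  induction hs generalizing ps with
  | nil =>
    unfold pvOutA pvOutB pvLoopHints
    rw [pvFold_base]
    cases pvFindFallback ps <;> rfl
  | cons h t ih =>
    unfold pvOutA pvOutB
    simp only [pvLoopHints]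
    cases hfind : pvFindHint h ps with
    | some j =>
      rw [pvFold_firstZero h t ps j none hfind (by intro r bj hb; cases hb)]
    | none =>
      have hnm := pvFindHint_none h ps hfind
      have hcongr : ps.foldl (pvStep (pvRankGen (h :: t))) none
          = ps.foldl (pvStep (fun lab => (pvRankGen t lab).map (· + 1))) none := by
        apply PySem.List.foldl_congr_mem
        intro acc p hp
        have hq := hnm p hp
        unfold pvStep
        rw [pvRankGen_cons]
        by_cases he : p.2 = ""
        · rw [if_pos he]
          have hnone : pvRankGen t p.2 = none := by rw [pvRankGen]; rw [if_pos he]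
          simp only [hnone, Option.map_none]
        · rw [if_neg he, if_neg (fun hc => hq ⟨he, hc⟩)]
      rw [hcongr]
      have hshift := pvFold_shift (pvRankGen t) ps none
      simp only [Option.map_none] at hshift
      rw [hshift]
      have hInd := ih ps
      unfold pvOutA pvOutB at hInd
      cases hff : ps.foldl (pvStep (pvRankGen t)) none with
      | none => simp only [hff] at hInd ⊢; simpa using hInd
      | some b =>
        obtain ⟨br, bj⟩ := b
        simp only [hff] at hInd ⊢
        simpa using hInd
-- ===== VERDICT (by name: the statement is the Claim_ definition above) =====
theorem best_amount_col_py_spec : Claim_equal_best_amount_col_py := by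
  intro labels _
  show best_amount_col_py labels = best_amount_col_py_alt labels
  have h := pvOutA_eq_outB pvHints (PySem.List.enumerate labels)
  unfold pvOutA pvOutB at h
  exact h
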